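-- pv_equiv track=rewrite | github.com/rlauv-teachx/vibe-coded | apps/feature_site/modules/feature_identifier/geometry.py | get_outline_coordinates
-- ===== SOURCE A (Python) =====
-- from typing import List, Tuple
--
-- def get_outline_coordinates(x: int, y: int, w: int, h: int) -> List[Tuple[int, int]]:
--     """
--     Get list of (x, y) coordinates for the bounding box perimeter.
--     Order: Top-Left -> Top-Right -> Bottom-Right -> Bottom-Left -> Top-Left(exclusive)
--     """
--     # Handle degenerate cases where width or height is 1 (line-shaped boxes)
--     if w == 1:  # Vertical line
--         return [(x, y + i) for i in range(h)]
--     if h == 1:  # Horizontal line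
--         return [(x + i, y) for i in range(w)]
--
--     # Standard rectangle (both dimensions >= 2)
--     top = [(x + i, y) for i in range(w)]
--     right = [(x + w - 1, y + i) for i in range(1, h)]
--     bottom = [(x + i, y + h - 1) for i in range(w - 2, -1, -1)]
--     left = [(x, y + i) for i in range(h - 2, 0, -1)]
--
--     return top + right + bottom + left
-- ===== SOURCE B (Python) =====
-- def get_outline_coordinates(x, y, w, h):
--     # Empty box: no perimeter.
--     if w <= 0 or h <= 0:
--         return []
--     if w == 1:  # Vertical line
--         return [(x, y + i) for i in range(h)]
--     if h == 1:  # Horizontal line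
--         return [(x + i, y) for i in range(w)]
--     # Single clockwise perimeter walk, turning right at each corner.
--     x1, y1 = x + w - 1, y + h - 1
--     pts = []
--     cx, cy, dx, dy = x, y, 1, 0
--     while True:
--         pts.append((cx, cy))
--         nx, ny = cx + dx, cy + dy
--         if nx > x1 or nx < x or ny > y1 or ny < y:
--             dx, dy = -dy, dx  # turn right
--             nx, ny = cx + dx, cy + dy
--         if (nx, ny) == (x, y):
--             break
--         cx, cy = nx, ny
--     return pts
-- ===== Notes on version B (the rewrite author's own statement) =====
-- stated objective: alternative
-- what changed: Replaces A's four separate range-comprehension segments (top/right/bottom/left) by a single clockwise perimeter walk that keeps a current position and direction and turns right at each rectangle corner until it returns to the start; B also guards nonpositive dimensions with an empty outline.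
-- intended difference: On inputs with nonpositive width or height while the other dimension is >= 2 (so neither equals 1), A returns stray fragments of sides of a box that does not exist (e.g. A(0,0,0,3) = [(-1,1),(-1,2),(0,1)]) while B returns [], the intended outline of an empty box. — e.g. on get_outline_coordinates(0, 0, 0, 3): A returns [(-1, 1), (-1, 2), (0, 1)], B returns []
import Mathlib
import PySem

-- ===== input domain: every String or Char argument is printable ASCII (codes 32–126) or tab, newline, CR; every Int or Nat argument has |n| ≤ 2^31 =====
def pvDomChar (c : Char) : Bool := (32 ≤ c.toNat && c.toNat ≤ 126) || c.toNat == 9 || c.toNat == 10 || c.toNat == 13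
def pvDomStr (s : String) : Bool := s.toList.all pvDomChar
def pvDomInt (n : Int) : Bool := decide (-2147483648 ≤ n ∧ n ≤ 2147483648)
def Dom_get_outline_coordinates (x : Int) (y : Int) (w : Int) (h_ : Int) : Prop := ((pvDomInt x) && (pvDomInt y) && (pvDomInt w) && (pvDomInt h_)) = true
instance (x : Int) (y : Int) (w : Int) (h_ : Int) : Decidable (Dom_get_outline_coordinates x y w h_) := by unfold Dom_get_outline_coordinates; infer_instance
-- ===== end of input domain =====

-- B replaces A's four range-comprehension segments by ONE clockwise perimeter walk
-- (current position + direction, turn right at each corner until back at the start);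
-- alternative decomposition, same cost; B returns [] for nonpositive dimensions (see D_).

-- ===== PORT A =====
def get_outline_coordinates (x : Int) (y : Int) (w : Int) (h_ : Int) : List (Int × Int) :=
  if w = 1 then (PySem.List.pyRange 0 h_ 1).map (fun i => (x, y + i))
  else if h_ = 1 then (PySem.List.pyRange 0 w 1).map (fun i => (x + i, y))
  else
    let top := (PySem.List.pyRange 0 w 1).map (fun i => (x + i, y))
    let right := (PySem.List.pyRange 1 h_ 1).map (fun i => (x + w - 1, y + i))
    let bottom := (PySem.List.pyRange (w - 2) (-1) (-1)).map (fun i => (x + i, y + h_ - 1))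
    let left := (PySem.List.pyRange (h_ - 2) 0 (-1)).map (fun i => (x, y + i))
    top ++ right ++ bottom ++ left

-- ===== PORT B =====
-- the while-True loop of Source B; the fuel 2*(w+h) only bounds its 2w+2h-4 iterations (totality)
def pvWalk (x y x1 y1 : Int) : Nat → Int → Int → Int → Int → List (Int × Int) → List (Int × Int)
  | 0, _, _, _, _, acc => acc
  | Nat.succ f, cx, cy, dx, dy, acc =>
    let acc' := acc ++ [(cx, cy)]
    let nx := cx + dx
    let ny := cy + dy
    if nx > x1 ∨ nx < x ∨ ny > y1 ∨ ny < y then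
      let dx' := -dy
      let dy' := dx
      let nx' := cx + dx'
      let ny' := cy + dy'
      if nx' = x ∧ ny' = y then acc' else pvWalk x y x1 y1 f nx' ny' dx' dy' acc'
    else
      if nx = x ∧ ny = y then acc' else pvWalk x y x1 y1 f nx ny dx dy acc'

def get_outline_coordinates_alt (x : Int) (y : Int) (w : Int) (h_ : Int) : List (Int × Int) :=
  if w ≤ 0 ∨ h_ ≤ 0 then []
  else if w = 1 then (PySem.List.pyRange 0 h_ 1).map (fun i => (x, y + i))
  else if h_ = 1 then (PySem.List.pyRange 0 w 1).map (fun i => (x + i, y))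
  else pvWalk x y (x + w - 1) (y + h_ - 1) (2 * (w + h_)).toNat x y 1 0 []

-- ===== PRECONDITION & SPEC =====
-- On inputs with nonpositive width or height while the other dimension is ≥ 2 (so neither
-- equals 1), A returns stray fragments of sides of a box that does not exist, while B
-- returns [], the intended outline of an empty box.
def D_get_outline_coordinates (x : Int) (y : Int) (w : Int) (h_ : Int) : Prop :=
  (w ≤ 0 ∧ 2 ≤ h_) ∨ (h_ ≤ 0 ∧ 2 ≤ w)
instance (x : Int) (y : Int) (w : Int) (h_ : Int) : Decidable (D_get_outline_coordinates x y w h_) := by unfold D_get_outline_coordinates; infer_instance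

def Spec_get_outline_coordinates (x : Int) (y : Int) (w : Int) (h_ : Int) (out : List (Int × Int)) : Prop := ¬ D_get_outline_coordinates x y w h_ → out = get_outline_coordinates_alt x y w h_
instance (x : Int) (y : Int) (w : Int) (h_ : Int) (out : List (Int × Int)) : Decidable (Spec_get_outline_coordinates x y w h_ out) := by unfold Spec_get_outline_coordinates; infer_instance

def pvDiffWitness_get_outline_coordinates : Int × Int × Int × Int := (0, 0, 0, 3)
def pvDiffWitnessOut_get_outline_coordinates : (List (Int × Int)) × (List (Int × Int)) :=
  ([(-1, 1), (-1, 2), (0, 1)], [])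

-- ===== CLAIM (what is proved, stated in full; the proofs are below) =====
def Claim_unchanged_get_outline_coordinates : Prop := ∀ (x : Int) (y : Int) (w : Int) (h_ : Int), Dom_get_outline_coordinates x y w h_ → Spec_get_outline_coordinates x y w h_ (get_outline_coordinates x y w h_)
def Claim_changed_get_outline_coordinates : Prop := Dom_get_outline_coordinates (pvDiffWitness_get_outline_coordinates.1) (pvDiffWitness_get_outline_coordinates.2.1) (pvDiffWitness_get_outline_coordinates.2.2.1) (pvDiffWitness_get_outline_coordinates.2.2.2) ∧ D_get_outline_coordinates (pvDiffWitness_get_outline_coordinates.1) (pvDiffWitness_get_outline_coordinates.2.1) (pvDiffWitness_get_outline_coordinates.2.2.1) (pvDiffWitness_get_outline_coordinates.2.2.2) ∧ get_outline_coordinates (pvDiffWitness_get_outline_coordinates.1) (pvDiffWitness_get_outline_coordinates.2.1) (pvDiffWitness_get_outline_coordinates.2.2.1) (pvDiffWitness_get_outline_coordinates.2.2.2) = pvDiffWitnessOut_get_outline_coordinates.1 ∧ get_outline_coordinates_alt (pvDiffWitness_get_outline_coordinates.1) (pvDiffWitness_get_outline_coordinates.2.1) (pvDiffWitness_get_outline_coordinates.2.2.1)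 (pvDiffWitness_get_outline_coordinates.2.2.2) = pvDiffWitnessOut_get_outline_coordinates.2 ∧ pvDiffWitnessOut_get_outline_coordinates.1 ≠ pvDiffWitnessOut_get_outline_coordinates.2
def Claim_exact_get_outline_coordinates : Prop := ∀ (x : Int) (y : Int) (w : Int) (h_ : Int), Dom_get_outline_coordinates x y w h_ → D_get_outline_coordinates x y w h_ → get_outline_coordinates x y w h_ ≠ get_outline_coordinates_alt x y w h_

-- ===== LEMMAS AND PROOFS =====

theorem pv_range_shift {α : Type} (n : Nat) (g : Nat → α) :
    (List.range (n + 1)).map g = g 0 :: (List.range n).map (fun k => g (k + 1)) := by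
  rw [List.range_succ_eq_map, List.map_cons, List.map_map]; rfl

theorem pvWalk_up (x y x1 y1 : Int) (hx : x < x1) (hy : y < y1) :
    ∀ (t f : Nat) (acc : List (Int × Int)), (y : Int) + 1 + t ≤ y1 → t + 1 ≤ f →
      pvWalk x y x1 y1 f x (y + 1 + t) 0 (-1) acc =
        acc ++ (List.range (t + 1)).map (fun (k : Nat) => (x, y + 1 + (t : Int) - (k : Int))) := by
  intro t
  induction t with
  | zero =>
    intro f acc ht hf
    cases f with
    | zero => omega
    | succ f =>
      simp only [pvWalk]
      rw [if_neg (by push_cast; omega), if_pos (by constructor <;> push_cast <;> ring)]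
      simp
  | succ t ih =>
    intro f acc ht hf
    cases f with
    | zero => omega
    | succ f =>
      simp only [pvWalk]
      rw [if_neg (by push_cast; omega), if_neg (by push_cast; omega)]
      have e0 : x + 0 = x := by ring
      have h2 : y + 1 + ((t:Nat)+1:Nat) + -1 = y + 1 + (t:Int) := by push_cast; ring
      rw [e0, h2, ih f (acc ++ [(x, y + 1 + ((t:Nat)+1:Nat))]) (by push_cast at ht ⊢; omega) (by omega)]
      rw [pv_range_shift (t+1) (fun k => ((x, y + 1 + ((t:Nat)+1:Nat) - (k:Int)) : Int × Int))]
      simp only [List.append_assoc, List.singleton_append]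
      congr 1
      congr 1
      · congr 1; push_cast; ring
      · apply List.map_congr_left; intro k hk; congr 1; push_cast; ring

theorem pvWalk_left (x y x1 y1 : Int) (hx : x < x1) (hy : y < y1) :
    ∀ (t f : Nat) (acc : List (Int × Int)), (x : Int) + t ≤ x1 - 1 →
      t + 1 + (y1 - y - 1).toNat ≤ f →
      pvWalk x y x1 y1 f (x + t) y1 (-1) 0 acc =
        acc ++ (List.range (t + 1)).map (fun (k : Nat) => (x + (t : Int) - (k : Int), y1))
            ++ (List.range ((y1 - y - 1).toNat)).map (fun (k : Nat) => (x, y1 - 1 - (k : Int))) := by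
  intro t
  induction t with
  | zero =>
    intro f acc ht hf
    simp only [Nat.cast_zero, add_zero] at *
    cases f with
    | zero => omega
    | succ f =>
      simp only [pvWalk]
      rw [if_pos (by omega)]
      by_cases hcorner : y1 = y + 1
      · rw [if_pos (by constructor <;> omega)]
        subst hcorner
        simp
      · rw [if_neg (by intro hc; omega)]
        have hcy : y1 + -1 = y + 1 + ((y1 - y - 2).toNat : Int) := by omega
        rw [show (-(0:Int)) = 0 from by ring]
        simp only [add_zero]
        rw [hcy, pvWalk_up x y x1 y1 hx hy (y1 - y - 2).toNat f _ (by omega) (by omega)]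
        have hm : (List.range ((y1 - y - 2).toNat + 1)).map
              (fun (k : Nat) => ((x, y + 1 + ((y1 - y - 2).toNat : Int) - (k : Int)) : Int × Int))
            = (List.range ((y1 - y - 1).toNat)).map (fun (k : Nat) => ((x, y1 - 1 - (k : Int)) : Int × Int)) := by
          rw [show (y1 - y - 2).toNat + 1 = (y1 - y - 1).toNat from by omega]
          apply List.map_congr_left
          intro k hk
          congr 1
          omega
        rw [hm]
        simp [List.append_assoc]
  | succ t ih =>
    intro f acc ht hf
    cases f with
    | zero => omega
    | succ f =>
      simp only [pvWalk]
      rw [if_neg (by push_cast; omega), if_neg (by intro hc; omega)]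
      have e0 : y1 + 0 = y1 := by ring
      have e1 : x + ((t:Nat)+1:Nat) + -1 = x + (t:Int) := by push_cast; ring
      rw [e0, e1, ih f _ (by push_cast at ht ⊢; omega) (by omega)]
      have hsh : (List.range (t + 1 + 1)).map (fun (k : Nat) => ((x + (((t:Nat)+1:Nat) : Int) - (k : Int), y1) : Int × Int))
          = (x + (((t:Nat)+1:Nat) : Int), y1) :: (List.range (t + 1)).map (fun (k : Nat) => ((x + (t : Int) - (k : Int), y1) : Int × Int)) := by
        rw [pv_range_shift]
        simp only [Nat.cast_zero, sub_zero]
        congr 1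
        apply List.map_congr_left
        intro k hk
        congr 1
        push_cast; ring
      rw [hsh]
      simp [List.append_assoc]

theorem pvWalk_down (x y x1 y1 : Int) (hx : x < x1) (hy : y < y1) :
    ∀ (t f : Nat) (acc : List (Int × Int)), (y : Int) + 1 + t ≤ y1 →
      t + 1 + (x1 - x).toNat + (y1 - y - 1).toNat ≤ f →
      pvWalk x y x1 y1 f x1 (y1 - t) 0 1 acc =
        acc ++ (List.range (t + 1)).map (fun (k : Nat) => (x1, y1 - (t : Int) + (k : Int)))
            ++ (List.range ((x1 - x).toNat)).map (fun (k : Nat) => (x1 - 1 - (k : Int), y1))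
            ++ (List.range ((y1 - y - 1).toNat)).map (fun (k : Nat) => (x, y1 - 1 - (k : Int))) := by
  intro t
  induction t with
  | zero =>
    intro f acc ht hf
    simp only [Nat.cast_zero, sub_zero] at *
    cases f with
    | zero => omega
    | succ f =>
      simp only [pvWalk]
      rw [if_pos (by omega), if_neg (by intro hc; omega)]
      rw [show (-(1:Int)) = -1 from rfl, show y1 + (0:Int) = y1 from by ring]
      have hcx : x1 + -1 = x + ((x1 - 1 - x).toNat : Int) := by omega
      rw [hcx, pvWalk_left x y x1 y1 hx hy (x1 - 1 - x).toNat f _ (by omega) (by omega)]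
      have hm : (List.range ((x1 - 1 - x).toNat + 1)).map
            (fun (k : Nat) => ((x + ((x1 - 1 - x).toNat : Int) - (k : Int), y1) : Int × Int))
          = (List.range ((x1 - x).toNat)).map (fun (k : Nat) => ((x1 - 1 - (k : Int), y1) : Int × Int)) := by
        rw [show (x1 - 1 - x).toNat + 1 = (x1 - x).toNat from by omega]
        apply List.map_congr_left
        intro k hk
        congr 1
        omega
      rw [hm]
      simp [List.append_assoc]
  | succ t ih =>
    intro f acc ht hf
    cases f with
    | zero => omega
    | succ f =>
      simp only [pvWalk]
      rw [if_neg (by push_cast; omega), if_neg (by intro hc; omega)]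
      rw [show x1 + (0:Int) = x1 from by ring,
          show y1 - (((t:Nat)+1:Nat) : Int) + 1 = y1 - (t : Int) from by push_cast; ring]
      rw [ih f _ (by push_cast at ht ⊢; omega) (by omega)]
      have hsh : (List.range (t + 1 + 1)).map (fun (k : Nat) => ((x1, y1 - (((t:Nat)+1:Nat) : Int) + (k : Int)) : Int × Int))
          = (x1, y1 - (((t:Nat)+1:Nat) : Int)) :: (List.range (t + 1)).map (fun (k : Nat) => ((x1, y1 - (t : Int) + (k : Int)) : Int × Int)) := by
        rw [pv_range_shift]
        simp only [Nat.cast_zero, add_zero]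
        congr 1
        apply List.map_congr_left
        intro k hk
        congr 1
        push_cast; ring
      rw [hsh]
      simp [List.append_assoc]

theorem pvWalk_right (x y x1 y1 : Int) (hx : x < x1) (hy : y < y1) :
    ∀ (t f : Nat) (acc : List (Int × Int)), (x : Int) + t ≤ x1 →
      t + 1 + (y1 - y).toNat + (x1 - x).toNat + (y1 - y - 1).toNat ≤ f →
      pvWalk x y x1 y1 f (x1 - t) y 1 0 acc =
        acc ++ (List.range (t + 1)).map (fun (k : Nat) => (x1 - (t : Int) + (k : Int), y))
            ++ (List.range ((y1 - y).toNat)).map (fun (k : Nat) => (x1, y + 1 + (k : Int)))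
            ++ (List.range ((x1 - x).toNat)).map (fun (k : Nat) => (x1 - 1 - (k : Int), y1))
            ++ (List.range ((y1 - y - 1).toNat)).map (fun (k : Nat) => (x, y1 - 1 - (k : Int))) := by
  intro t
  induction t with
  | zero =>
    intro f acc ht hf
    simp only [Nat.cast_zero, sub_zero] at *
    cases f with
    | zero => omega
    | succ f =>
      simp only [pvWalk]
      rw [if_pos (by omega), if_neg (by intro hc; omega)]
      rw [show (-(0:Int)) = 0 from by ring, show x1 + (0:Int) = x1 from by ring]
      have hdn := pvWalk_down x y x1 y1 hx hy (y1 - y - 1).toNat f (acc ++ [(x1, y)]) (by omega) (by omega)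
      rw [show y1 - (((y1 - y - 1).toNat) : Int) = y + 1 from by omega,
          show (y1 - y - 1).toNat + 1 = (y1 - y).toNat from by omega] at hdn
      rw [hdn]
      simp [List.append_assoc]
  | succ t ih =>
    intro f acc ht hf
    cases f with
    | zero => omega
    | succ f =>
      simp only [pvWalk]
      rw [if_neg (by push_cast; omega), if_neg (by intro hc; push_cast at ht; omega)]
      rw [show y + (0:Int) = y from by ring,
          show x1 - (((t:Nat)+1:Nat) : Int) + 1 = x1 - (t : Int) from by push_cast; ring]
      rw [ih f _ (by push_cast at ht ⊢; omega) (by omega)]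
      have hsh : (List.range (t + 1 + 1)).map (fun (k : Nat) => ((x1 - (((t:Nat)+1:Nat) : Int) + (k : Int), y) : Int × Int))
          = (x1 - (((t:Nat)+1:Nat) : Int), y) :: (List.range (t + 1)).map (fun (k : Nat) => ((x1 - (t : Int) + (k : Int), y) : Int × Int)) := by
        rw [pv_range_shift]
        simp only [Nat.cast_zero, add_zero]
        congr 1
        apply List.map_congr_left
        intro k hk
        congr 1
        push_cast; ring
      rw [hsh]
      simp [List.append_assoc]

theorem pv_A_nil (x y w h_ : Int) (hw : w ≤ 0) (hh : h_ ≤ 0) :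
    get_outline_coordinates x y w h_ = [] := by
  unfold get_outline_coordinates
  rw [if_neg (by omega), if_neg (by omega)]
  simp only [PySem.List.pyRange_one_eq_nil (by omega : h_ ≤ 1),
    PySem.List.pyRange_one_eq_nil (by omega : w ≤ 0),
    PySem.List.pyRange_neg_one_eq_nil (by omega : w - 2 ≤ -1),
    PySem.List.pyRange_neg_one_eq_nil (by omega : h_ - 2 ≤ 0)]
  simp

theorem pv_main_rect (x y w h_ : Int) (hw : 2 ≤ w) (hh : 2 ≤ h_) :
    get_outline_coordinates x y w h_ = get_outline_coordinates_alt x y w h_ := by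
  have hx : x < x + w - 1 := by omega
  have hy : y < y + h_ - 1 := by omega
  have hr := pvWalk_right x y (x + w - 1) (y + h_ - 1) hx hy ((x + w - 1) - x).toNat
      (2 * (w + h_)).toNat [] (by omega) (by omega)
  rw [show (x + w - 1) - (((x + w - 1) - x).toNat : Int) = x from by omega] at hr
  have htop : (PySem.List.pyRange 0 w 1).map (fun i => ((x + i, y) : Int × Int))
      = (List.range (((x + w - 1) - x).toNat + 1)).map (fun (k : Nat) => ((x + (k : Int), y) : Int × Int)) := by
    rw [PySem.List.pyRange_one, List.map_map,
      show (w - 0).toNat = ((x + w - 1) - x).toNat + 1 from by omega]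
    apply List.map_congr_left; intro k hk
    simp only [Function.comp]
    congr 1; ring
  have hright : (PySem.List.pyRange 1 h_ 1).map (fun i => ((x + w - 1, y + i) : Int × Int))
      = (List.range (((y + h_ - 1) - y).toNat)).map (fun (k : Nat) => ((x + w - 1, (y + 1 + (k : Int))) : Int × Int)) := by
    rw [PySem.List.pyRange_one, List.map_map,
      show (h_ - 1).toNat = ((y + h_ - 1) - y).toNat from by omega]
    apply List.map_congr_left; intro k hk
    simp only [Function.comp]
    congr 1; ring
  have hbottom : (PySem.List.pyRange (w - 2) (-1) (-1)).map (fun i => ((x + i, y + h_ - 1) : Int × Int))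
      = (List.range (((x + w - 1) - x).toNat)).map (fun (k : Nat) => ((x + w - 1 - 1 - (k : Int), y + h_ - 1) : Int × Int)) := by
    rw [PySem.List.pyRange_neg_one, List.map_map,
      show (w - 2 - (-1)).toNat = ((x + w - 1) - x).toNat from by omega]
    apply List.map_congr_left; intro k hk
    simp only [Function.comp]
    congr 1; ring
  have hleft : (PySem.List.pyRange (h_ - 2) 0 (-1)).map (fun i => ((x, y + i) : Int × Int))
      = (List.range (((y + h_ - 1) - y - 1).toNat)).map (fun (k : Nat) => ((x, y + h_ - 1 - 1 - (k : Int)) : Int × Int)) := by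
    rw [PySem.List.pyRange_neg_one, List.map_map,
      show (h_ - 2 - 0).toNat = ((y + h_ - 1) - y - 1).toNat from by omega]
    apply List.map_congr_left; intro k hk
    simp only [Function.comp]
    congr 1; ring
  unfold get_outline_coordinates get_outline_coordinates_alt
  rw [if_neg (by omega), if_neg (by omega), if_neg (by omega), if_neg (by omega),
    if_neg (by omega)]
  rw [hr, htop, hright, hbottom, hleft]
  simp [List.append_assoc]



theorem pv_tight (x y w h_ : Int) (hD : (w ≤ 0 ∧ 2 ≤ h_) ∨ (h_ ≤ 0 ∧ 2 ≤ w)) :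
    get_outline_coordinates x y w h_ ≠ get_outline_coordinates_alt x y w h_ := by
  have hB : get_outline_coordinates_alt x y w h_ = [] := by
    unfold get_outline_coordinates_alt
    rw [if_pos (by omega)]
  rw [hB]
  unfold get_outline_coordinates
  rw [if_neg (by omega), if_neg (by omega)]
  intro heq
  rcases hD with ⟨hw, hh⟩ | ⟨hh, hw⟩
  · rw [PySem.List.pyRange_one_cons (by omega : (1:Int) < h_)] at heq
    simp at heq
  · rw [PySem.List.pyRange_one_cons (by omega : (0:Int) < w)] at heq
    simp at heq

theorem pv_spec (x y w h_ : Int) (hD : ¬ ((w ≤ 0 ∧ 2 ≤ h_) ∨ (h_ ≤ 0 ∧ 2 ≤ w))) :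
    get_outline_coordinates x y w h_ = get_outline_coordinates_alt x y w h_ := by
  by_cases hw1 : w = 1
  · subst hw1
    unfold get_outline_coordinates get_outline_coordinates_alt
    by_cases hh0 : h_ ≤ 0
    · rw [if_pos rfl, if_pos (by omega), PySem.List.pyRange_one_eq_nil (by omega : h_ ≤ 0)]
      simp
    · rw [if_pos rfl, if_neg (by omega), if_pos rfl]
  · by_cases hh1 : h_ = 1
    · subst hh1
      unfold get_outline_coordinates get_outline_coordinates_alt
      by_cases hw0 : w ≤ 0
      · rw [if_neg hw1, if_pos rfl, if_pos (by omega), PySem.List.pyRange_one_eq_nil (by omega : w ≤ 0)]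
        simp
      · rw [if_neg hw1, if_pos rfl, if_neg (by omega), if_neg hw1, if_pos rfl]
    · by_cases hw0 : w ≤ 0
      · have hh0 : h_ ≤ 0 := by omega
        rw [pv_A_nil x y w h_ hw0 hh0]
        unfold get_outline_coordinates_alt
        rw [if_pos (by omega)]
      · by_cases hh0 : h_ ≤ 0
        · exact absurd (Or.inr ⟨hh0, by omega⟩) hD
        · exact pv_main_rect x y w h_ (by omega) (by omega)


-- ===== VERDICT (by name: the statement is the Claim_ definition above) =====
theorem get_outline_coordinates_spec : Claim_unchanged_get_outline_coordinates := by
  intro x y w h_ _ hnD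
  unfold D_get_outline_coordinates at hnD
  exact pv_spec x y w h_ hnD

theorem get_outline_coordinates_changed : Claim_changed_get_outline_coordinates := by
  unfold Claim_changed_get_outline_coordinates; decide

theorem get_outline_coordinates_tight : Claim_exact_get_outline_coordinates := by
  intro x y w h_ _ hD
  unfold D_get_outline_coordinates at hD
  exact pv_tight x y w h_ hD
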